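-- pv_equiv track=rewrite | github.com/rbashirov/Algorithms | scheduling_difference.py | weighted_a
-- ===== SOURCE A (Python) =====
-- def weighted_a(w,l):
--     res = 0
--     l_w = [0]*len(w)
--     count = 0
--     for i in range(len(w)):
--         count+=l[i]
--         l_w[i]=count
--     for i in range(len(w)):
--         res+=w[i]*l_w[i]
--     return res
-- ===== SOURCE B (Python) =====
-- def weighted_a(w, l):
--     # single backward pass: running suffix sum of w, accumulated against l
--     res = 0
--     acc = 0
--     for i in range(len(w) - 1, -1, -1):
--         acc += w[i]
--         res += l[i] * acc
--     return res
-- ===== Notes on version B (the rewrite author's own statement) =====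
-- stated objective: alternative
-- what changed: B replaces A's two forward passes (build a prefix-sum table of l, then dot it with w) by one backward pass over the indices that maintains a running suffix sum of w and accumulates the result directly, with no table.
import Mathlib
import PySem

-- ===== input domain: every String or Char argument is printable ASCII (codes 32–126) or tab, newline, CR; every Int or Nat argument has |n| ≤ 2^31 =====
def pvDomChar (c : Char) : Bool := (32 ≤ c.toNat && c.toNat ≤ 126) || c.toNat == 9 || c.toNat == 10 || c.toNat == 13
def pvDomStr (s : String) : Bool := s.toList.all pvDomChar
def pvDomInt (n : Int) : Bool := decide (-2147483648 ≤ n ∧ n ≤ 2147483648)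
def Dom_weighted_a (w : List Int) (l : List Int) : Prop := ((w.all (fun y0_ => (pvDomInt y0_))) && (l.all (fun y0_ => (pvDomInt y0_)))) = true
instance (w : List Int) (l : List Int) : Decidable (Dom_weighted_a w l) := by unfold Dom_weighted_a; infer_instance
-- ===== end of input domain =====

-- B replaces A's two forward passes (prefix-sum table of l, then dot with w) by one single
-- backward pass maintaining a running suffix sum of w; objective: alternative decomposition, same O(n).

-- ===== PORT A =====
-- prefix sums of l (first len(w) entries) stored into a preallocated table, then dotted with w
def weighted_a (w : List Int) (l : List Int) : Int :=
  let st := (PySem.List.pyRange 0 (w.length : Int) 1).foldl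
    (fun (p : Int × List Int) i =>
      let count := p.1 + PySem.List.pyGetD l i 0
      (count, PySem.List.pySetD p.2 i count))
    (0, List.replicate w.length 0)
  (PySem.List.pyRange 0 (w.length : Int) 1).foldl
    (fun res i => res + PySem.List.pyGetD w i 0 * PySem.List.pyGetD st.2 i 0) 0

-- ===== PORT B =====
-- single countdown loop: acc is the suffix sum of w, res accumulates l[i]*acc
def weighted_a_alt (w : List Int) (l : List Int) : Int :=
  ((PySem.List.pyRange ((w.length : Int) - 1) (-1) (-1)).foldl
    (fun (p : Int × Int) i =>
      let acc := p.1 + PySem.List.pyGetD w i 0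
      (acc, p.2 + PySem.List.pyGetD l i 0 * acc))
    (0, 0)).2

-- ===== PRECONDITION & SPEC =====
-- Pre_ excludes exactly the inputs with len(l) < len(w), where both A and B raise IndexError.
def Pre_weighted_a (w : List Int) (l : List Int) : Prop := w.length ≤ l.length
instance (w : List Int) (l : List Int) : Decidable (Pre_weighted_a w l) := by unfold Pre_weighted_a; infer_instance
def pvWitness_weighted_a : List Int × List Int := ([2, -3, 5], [1, 4, -2])

def Spec_weighted_a (w : List Int) (l : List Int) (out : Int) : Prop := out = weighted_a_alt w l
instance (w : List Int) (l : List Int) (out : Int) : Decidable (Spec_weighted_a w l out) := by unfold Spec_weighted_a; infer_instance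

-- ===== CLAIM (what is proved, stated in full; the proofs are below) =====
def Claim_equal_weighted_a : Prop := ∀ (w : List Int) (l : List Int), Dom_weighted_a w l → Pre_weighted_a w l → Spec_weighted_a w l (weighted_a w l)

-- ===== LEMMAS AND PROOFS =====

-- (l.take k).sum as a range sum over getD (zeros pad past the end)
lemma take_sum_eq (l : List Int) (k : Nat) :
    (l.take k).sum = ∑ j ∈ Finset.range k, l.getD j 0 := by
  induction k with
  | zero => simp
  | succ k ih =>
    rw [List.take_add_one, Finset.sum_range_succ, List.sum_append, ih]
    by_cases h : k < l.length
    · simp [List.getD_eq_getElem?_getD, List.getElem?_eq_getElem h]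
    · have h' : l[k]? = none := List.getElem?_eq_none (by omega)
      simp [List.getD_eq_getElem?_getD, h']

-- foldl of additions over range is a Finset sum
lemma foldl_add_range (f : Nat → Int) (n : Nat) (c : Int) :
    (List.range n).foldl (fun r k => r + f k) c = c + ∑ k ∈ Finset.range n, f k := by
  induction n generalizing c with
  | zero => simp
  | succ n ih => rw [List.range_succ, List.foldl_append, ih, Finset.sum_range_succ]; simp; ring

-- setting at the boundary of a prefix
lemma set_append_cons {α : Type} (xs : List α) (a : α) (ys : List α) (v : α) :
    (xs ++ a :: ys).set xs.length v = xs ++ v :: ys := by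
  induction xs with
  | nil => rfl
  | cons x xs ih => simp [ih]

-- A's first loop builds the prefix-sum table of l
lemma a_table (l : List Int) (n k : Nat) (hk : k ≤ n) :
    (List.range k).foldl
      (fun (p : Int × List Int) j =>
        let c := p.1 + l.getD j 0
        (c, p.2.set j c))
      (0, List.replicate n 0)
    = ((l.take k).sum,
       (List.range k).map (fun j => (l.take (j+1)).sum) ++ List.replicate (n - k) 0) := by
  induction k with
  | zero => simp
  | succ k ih =>
    rw [List.range_succ, List.foldl_append, ih (by omega)]
    have hrep : List.replicate (n - k) (0 : Int) = 0 :: List.replicate (n - (k+1)) 0 := by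
      have : n - k = (n - (k+1)) + 1 := by omega
      rw [this, List.replicate_succ]
    simp only [List.foldl_cons, List.foldl_nil, hrep]
    have hset := set_append_cons ((List.range k).map (fun j => (l.take (j+1)).sum))
      (0 : Int) (List.replicate (n - (k+1)) 0) ((l.take k).sum + l.getD k 0)
    simp only [List.length_map, List.length_range] at hset
    rw [hset]
    have hsum : (l.take (k+1)).sum = (l.take k).sum + l.getD k 0 := by
      rw [take_sum_eq, take_sum_eq, Finset.sum_range_succ]
    simp [List.map_append, hsum]

-- the reassociation of the double sum
lemma sum_swap (g h : Nat → Int) (n : Nat) :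
    ∑ i ∈ Finset.range n, h i * ∑ j ∈ Finset.range (i+1), g j
    = ∑ j ∈ Finset.range n, g j * ∑ i ∈ Finset.Ico j n, h i := by
  induction n with
  | zero => simp
  | succ n ih =>
    rw [Finset.sum_range_succ, ih]
    rw [Finset.sum_range_succ (fun j => g j * ∑ i ∈ Finset.Ico j n.succ, h i)]
    have hIco : ∀ j ∈ Finset.range n, g j * ∑ i ∈ Finset.Ico j (n+1), h i
        = g j * ∑ i ∈ Finset.Ico j n, h i + g j * h n := by
      intro j hj
      simp only [Finset.mem_range] at hj
      rw [Finset.sum_Ico_succ_top (by omega)]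
      ring
    rw [Finset.sum_congr rfl hIco, Finset.sum_add_distrib]
    rw [Nat.Ico_succ_singleton n, Finset.sum_singleton, Finset.sum_range_succ g, ← Finset.sum_mul]
    ring

-- characterize port A as a double sum
lemma a_eq (w l : List Int) :
    weighted_a w l
    = ∑ i ∈ Finset.range w.length,
        w.getD i 0 * ∑ j ∈ Finset.range (i+1), l.getD j 0 := by
  unfold weighted_a
  rw [PySem.List.pyRange_zero_nat]
  simp only [List.foldl_map, PySem.List.pyGetD_natCast, PySem.List.pySetD_natCast]
  rw [a_table l w.length w.length le_rfl]
  simp only [Nat.sub_self, List.replicate_zero, List.append_nil]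
  rw [foldl_add_range (fun k => w.getD k 0 *
    (((List.range w.length).map (fun j => (l.take (j+1)).sum)).getD k 0)) w.length 0]
  rw [zero_add]
  refine Finset.sum_congr rfl ?_
  intro k hk
  simp only [Finset.mem_range] at hk
  have : ((List.range w.length).map (fun j => (l.take (j+1)).sum)).getD k 0
      = (l.take (k+1)).sum := by
    rw [List.getD_eq_getElem?_getD]
    rw [List.getElem?_eq_getElem (by simpa using hk)]
    simp
  rw [this, take_sum_eq]

-- B's countdown loop: running suffix sums, in closed form (state generalized)
lemma b_loop (w l : List Int) (n : Nat) (a0 r0 : Int) :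
    (PySem.List.pyRange ((n : Int) - 1) (-1) (-1)).foldl
      (fun (p : Int × Int) i =>
        let acc := p.1 + PySem.List.pyGetD w i 0
        (acc, p.2 + PySem.List.pyGetD l i 0 * acc))
      (a0, r0)
    = (a0 + ∑ i ∈ Finset.range n, w.getD i 0,
       r0 + ∑ i ∈ Finset.range n,
              l.getD i 0 * (a0 + ∑ j ∈ Finset.Ico i n, w.getD j 0)) := by
  induction n generalizing a0 r0 with
  | zero =>
    rw [PySem.List.pyRange_neg_one_eq_nil (by norm_num)]
    simp
  | succ n ih =>
    have hcast : ((n + 1 : Nat) : Int) - 1 = (n : Int) := by push_cast; ring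
    rw [hcast, PySem.List.pyRange_neg_one_cons (by omega)]
    simp only [List.foldl_cons, PySem.List.pyGetD_natCast]
    rw [ih]
    refine Prod.ext ?_ ?_
    · simp only [Finset.sum_range_succ]; ring
    · simp only
      rw [Finset.sum_range_succ (fun i => l.getD i 0 * (a0 + ∑ j ∈ Finset.Ico i (n+1), w.getD j 0))]
      have hsplit : ∀ i ∈ Finset.range n,
          l.getD i 0 * (a0 + ∑ j ∈ Finset.Ico i (n+1), w.getD j 0)
          = l.getD i 0 * ((a0 + w.getD n 0) + ∑ j ∈ Finset.Ico i n, w.getD j 0) := by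
        intro i hi
        simp only [Finset.mem_range] at hi
        rw [Finset.sum_Ico_succ_top (by omega)]
        ring
      rw [Finset.sum_congr rfl hsplit]
      rw [Nat.Ico_succ_singleton n, Finset.sum_singleton]
      ring

-- characterize port B as the swapped double sum
lemma b_eq (w l : List Int) :
    weighted_a_alt w l
    = ∑ j ∈ Finset.range w.length,
        l.getD j 0 * ∑ i ∈ Finset.Ico j w.length, w.getD i 0 := by
  unfold weighted_a_alt
  rw [b_loop w l w.length 0 0]
  simp

-- ===== VERDICT (by name: the statement is the Claim_ definition above) =====
theorem weighted_a_spec : Claim_equal_weighted_a := by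
  intro w l _ _
  unfold Spec_weighted_a
  rw [a_eq, b_eq, sum_swap]
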